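-- pv_equiv track=rewrite | github.com/ViniGarcia/NFV-FLERAS | YAMLR/YAMLRGeneral.py | __ygBranch
-- ===== SOURCE A (Python) =====
-- def __ygBranch(elementsList, start):
--
-- 	skipBrace = 0
-- 	segments = 0
-- 	for index in range(start+1, len(elementsList)):
--
-- 		if elementsList[index] == "}":
-- 			if skipBrace == 0:
-- 				return segments + 1
-- 			else:
-- 				skipBrace -= 1
-- 			continue
--
-- 		if elementsList[index] == "{":
-- 			skipBrace += 1
-- 			continue
--
-- 		if elementsList[index] == "/":
-- 			if skipBrace == 0:
-- 				segments += 1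
-- ===== SOURCE B (Python) =====
-- def __ygBranch(elementsList, start):
-- 	# Gather the scanned tokens once, then recursive descent over the nested
-- 	# brace structure: skip_group consumes a balanced group via the call stack.
-- 	tokens = [elementsList[i] for i in range(start + 1, len(elementsList))]
-- 	n = len(tokens)
--
-- 	def skip_group(i):
-- 		# tokens[i:] starts just after an opening '{'; return the position after
-- 		# its matching '}', or None if the stream ends first.
-- 		while i < n:
-- 			t = tokens[i]
-- 			i += 1
-- 			if t == "}":
-- 				return i
-- 			if t == "{":
-- 				i = skip_group(i)
-- 				if i is None:
-- 					return None
-- 		return None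
--
-- 	def top(i, segments):
-- 		while i < n:
-- 			t = tokens[i]
-- 			i += 1
-- 			if t == "}":
-- 				return segments + 1
-- 			if t == "{":
-- 				i = skip_group(i)
-- 				if i is None:
-- 					return None
-- 			elif t == "/":
-- 				segments += 1
-- 		return None
--
-- 	return top(0, 0)
-- ===== Notes on version B (the rewrite author's own statement) =====
-- stated objective: alternative
-- what changed: Replaced the single loop with a skipBrace depth counter by a recursive descent: tokens are gathered once, a helper consumes each balanced nested group via the call stack, and segments are counted only at the top level.
import Mathlib
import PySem

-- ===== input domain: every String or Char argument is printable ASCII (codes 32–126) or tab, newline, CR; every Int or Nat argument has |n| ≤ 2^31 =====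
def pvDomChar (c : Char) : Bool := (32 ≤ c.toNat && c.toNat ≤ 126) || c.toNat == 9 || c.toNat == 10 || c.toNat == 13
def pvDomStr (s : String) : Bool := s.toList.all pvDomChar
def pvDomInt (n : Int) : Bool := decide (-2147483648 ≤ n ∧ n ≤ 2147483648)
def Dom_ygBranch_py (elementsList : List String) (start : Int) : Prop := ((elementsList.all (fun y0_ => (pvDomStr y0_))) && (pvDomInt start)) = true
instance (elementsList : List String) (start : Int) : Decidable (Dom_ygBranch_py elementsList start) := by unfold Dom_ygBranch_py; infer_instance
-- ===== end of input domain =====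

-- B replaces A's depth-counter loop by a two-phase recursive descent (gather tokens, then
-- consume nested groups via recursion); objective: alternative decomposition, same cost.

-- ===== PORT A =====
-- the for-loop over range(start+1, len) with state (skipBrace, segments); falling off the end = none
def ygALoop (elementsList : List String) : List Int → Int → Int → Option Int
  | [], _, _ => none
  | index :: rest, skipBrace, segments =>
    match PySem.List.pyGet? elementsList index with
    | none => none  -- IndexError; excluded by Pre_ygBranch_py
    | some t =>
      if t = "}" then
        if skipBrace = 0 then some (segments + 1) else ygALoop elementsList rest (skipBrace - 1) segments
      else if t = "{" then ygALoop elementsList rest (skipBrace + 1) segments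
      else if t = "/" then
        if skipBrace = 0 then ygALoop elementsList rest skipBrace (segments + 1)
        else ygALoop elementsList rest skipBrace segments
      else ygALoop elementsList rest skipBrace segments

def ygBranch_py (elementsList : List String) (start : Int) : Option Int :=
  ygALoop elementsList (PySem.List.pyRange (start + 1) (elementsList.length : Int) 1) 0 0

-- ===== PORT B =====
-- skip_group over the token stream; the Python index i is represented by the suffix tokens[i:].
-- The fuel argument only makes the nested recursion structurally total; it is always ample.
def ygSkipGroup : Nat → List String → Option (List String)
  | 0, _ => none
  | _ + 1, [] => none
  | f + 1, t :: ts =>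
    if t = "}" then some ts
    else if t = "{" then
      match ygSkipGroup f ts with
      | none => none
      | some ts' => ygSkipGroup f ts'
    else ygSkipGroup f ts

-- top: count '/' at the current level, return segments+1 at this level's '}'
def ygTop : Nat → List String → Int → Option Int
  | 0, _, _ => none
  | _ + 1, [], _ => none
  | f + 1, t :: ts, segments =>
    if t = "}" then some (segments + 1)
    else if t = "{" then
      match ygSkipGroup f ts with
      | none => none
      | some ts' => ygTop f ts' segments
    else if t = "/" then ygTop f ts (segments + 1)
    else ygTop f ts segments

def ygBranch_py_alt (elementsList : List String) (start : Int) : Option Int :=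
  let tokens := (PySem.List.pyRange (start + 1) (elementsList.length : Int) 1).map
    (fun i => PySem.List.pyGetD elementsList i "")  -- default never used under Pre_
  ygTop (tokens.length + 1) tokens 0

-- ===== PRECONDITION & SPEC =====
-- Pre_ excludes exactly the inputs where A raises IndexError (the first scanned index
-- start+1 lies below -len, so some elementsList[index] access is out of range).
def Pre_ygBranch_py (elementsList : List String) (start : Int) : Prop :=
  -(elementsList.length : Int) ≤ start + 1
instance (elementsList : List String) (start : Int) : Decidable (Pre_ygBranch_py elementsList start) := by unfold Pre_ygBranch_py; infer_instance

def pvWitness_ygBranch_py : List String × Int := (["a", "/", "{", "/", "}", "}"], -1)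

def Spec_ygBranch_py (elementsList : List String) (start : Int) (out : Option Int) : Prop := out = ygBranch_py_alt elementsList start
instance (elementsList : List String) (start : Int) (out : Option Int) : Decidable (Spec_ygBranch_py elementsList start out) := by unfold Spec_ygBranch_py; infer_instance

-- ===== CLAIM (what is proved, stated in full; the proofs are below) =====
def Claim_equal_ygBranch_py : Prop := ∀ (elementsList : List String) (start : Int), Dom_ygBranch_py elementsList start → Pre_ygBranch_py elementsList start → Spec_ygBranch_py elementsList start (ygBranch_py elementsList start)

-- ===== LEMMAS AND PROOFS =====

-- proof-only bridge: A's loop read through the token values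
def ygTokLoop : List String → Int → Int → Option Int
  | [], _, _ => none
  | t :: ts, skipBrace, segments =>
    if t = "}" then
      if skipBrace = 0 then some (segments + 1) else ygTokLoop ts (skipBrace - 1) segments
    else if t = "{" then ygTokLoop ts (skipBrace + 1) segments
    else if t = "/" then
      if skipBrace = 0 then ygTokLoop ts skipBrace (segments + 1)
      else ygTokLoop ts skipBrace segments
    else ygTokLoop ts skipBrace segments

theorem ygALoop_eq_tokLoop (el : List String) (idxs : List Int)
    (h : ∀ i ∈ idxs, PySem.List.pyGet? el i = some (PySem.List.pyGetD el i "")) :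
    ∀ skip seg, ygALoop el idxs skip seg =
      ygTokLoop (idxs.map (fun i => PySem.List.pyGetD el i "")) skip seg := by
  induction idxs with
  | nil => intro skip seg; rfl
  | cons i rest ih =>
    intro skip seg
    have hi := h i (List.mem_cons_self ..)
    have hrest : ∀ j ∈ rest, PySem.List.pyGet? el j = some (PySem.List.pyGetD el j "") :=
      fun j hj => h j (List.mem_cons_of_mem _ hj)
    simp only [ygALoop, ygTokLoop, hi, List.map_cons]
    split_ifs <;> simp [ih hrest]

theorem ygSkipGroup_length {f : Nat} {ts ts' : List String}
    (h : ygSkipGroup f ts = some ts') : ts'.length < ts.length := by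
  induction f generalizing ts ts' with
  | zero => simp [ygSkipGroup] at h
  | succ f ih =>
    cases ts with
    | nil => simp [ygSkipGroup] at h
    | cons t ts =>
      simp only [ygSkipGroup] at h
      split_ifs at h with h1 h2
      · cases h; simp
      · cases hu : ygSkipGroup f ts with
        | none => rw [hu] at h; cases h
        | some u =>
          rw [hu] at h
          have hu' := ih hu
          have h' := ih h
          simp only [List.length_cons]; omega
      · have := ih h; simp only [List.length_cons]; omega

-- key invariant: scanning at positive depth is exactly consuming one balanced group
theorem ygTokLoop_pos_depth {ts : List String} {f : Nat} (hf : ts.length < f) :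
    ∀ skip seg, 0 ≤ skip →
    ygTokLoop ts (skip + 1) seg =
      (match ygSkipGroup f ts with
       | none => none
       | some ts' => ygTokLoop ts' skip seg) := by
  induction f generalizing ts with
  | zero => omega
  | succ f ih =>
    intro skip seg hskip
    match ts with
    | [] => rfl
    | t :: ts =>
      simp only [List.length_cons] at hf
      simp only [ygTokLoop, ygSkipGroup]
      split_ifs with h1 h2 h2 h3
      · omega
      · have hc : skip + 1 - 1 = skip := by omega
        rw [hc]
      · -- t = "{": depth goes to skip+2
        rw [ih (ts := ts) (by omega) (skip + 1) seg (by omega)]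
        cases hu : ygSkipGroup f ts with
        | none => rfl
        | some u =>
          have hu' : u.length < ts.length := ygSkipGroup_length hu
          exact ih (by omega) skip seg hskip
      · omega
      · exact ih (by omega) skip seg hskip
      · exact ih (by omega) skip seg hskip

theorem ygTokLoop_zero_eq_top {ts : List String} {f : Nat} (hf : ts.length < f) :
    ∀ seg, ygTokLoop ts 0 seg = ygTop f ts seg := by
  induction f generalizing ts with
  | zero => omega
  | succ f ih =>
    intro seg
    match ts with
    | [] => rfl
    | t :: ts =>
      simp only [List.length_cons] at hf
      simp only [ygTokLoop, ygTop]
      split_ifs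
      · rfl
      · rw [ygTokLoop_pos_depth (f := f) (by omega) 0 seg (by omega)]
        cases hu : ygSkipGroup f ts with
        | none => rfl
        | some u =>
          have hu' : u.length < ts.length := ygSkipGroup_length hu
          exact ih (by omega) seg
      · exact ih (by omega) (seg + 1)
      · exact ih (by omega) seg

-- ===== VERDICT (by name: the statement is the Claim_ definition above) =====
theorem ygBranch_py_spec : Claim_equal_ygBranch_py := by
  intro el start _hdom hpre
  unfold Spec_ygBranch_py ygBranch_py ygBranch_py_alt
  have hget : ∀ i ∈ PySem.List.pyRange (start + 1) (el.length : Int) 1,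
      PySem.List.pyGet? el i = some (PySem.List.pyGetD el i "") := by
    intro i hi
    rw [PySem.List.mem_pyRange_one] at hi
    have hrange : PySem.Raise.InRange el.length i := by
      unfold Pre_ygBranch_py at hpre
      simp [PySem.Raise.InRange]; omega
    cases hx : PySem.List.pyGet? el i with
    | none =>
      rw [PySem.List.pyGet?_eq_none_iff] at hx
      exact absurd hrange hx
    | some x =>
      have hd : PySem.List.pyGetD el i "" = x := by
        simp [PySem.List.pyGetD, hx]
      rw [hd]
  rw [ygALoop_eq_tokLoop el _ hget 0 0]
  exact ygTokLoop_zero_eq_top (by omega) 0
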